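-- pv_equiv track=rewrite | github.com/KatrinKroin/DES-3Loop-Attack | src/DES_Attack.py | ReverseS1
-- ===== SOURCE A (Python) =====
-- def ReverseS1(bits):
--     s=[[14, 4, 13, 1, 2, 15, 11, 8, 3, 10, 6, 12, 5, 9, 0, 7],
--         [0, 15, 7, 4, 14, 2, 13, 1, 10, 6, 12, 11, 9, 5, 3, 8],
--         [4, 1, 14, 8, 13, 6, 2, 11, 15, 12, 9, 7, 3, 10, 5, 0],
--         [15, 12, 8, 2, 4, 9, 1, 7, 5, 11, 3, 14, 10, 0, 6, 13]]
--
--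
--
--     key=[]
--     i=0
--     while i<6:
--         key+='x'
--         i+=1
--     if 'x' in bits:
--         return key
--
--     num=int(bits,2)
--     options=[]
--     k=0
--     q=0
--     for i in s:
--         for j in i:
--             if j==num:
--                 row=(bin(k)[2:].zfill(2))
--                 colomn=(bin(q)[2:].zfill(4))
--                 temp=''
--                 temp=[row[0]+colomn[0:4]+row[1]]
--                 options+=temp
--             q+=1
--         k+=1
--         q=0
--
--     i=0
--     while i<6 :
--         if options[0][i]==options[1][i] and options[0][i]==options[2][i] and options[0][i]==options[3][i]:
--             key[i]=options[0][i]
--         i+=1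
--
--     return key
-- ===== SOURCE B (Python) =====
-- def ReverseS1(bits):
--     # bitwise aggregation over the four column indices instead of A's
--     # per-row 6-char string building and per-position char comparison
--     if 'x' in bits:
--         return list('xxxxxx')
--     num = int(bits, 2)
--     s = [[14, 4, 13, 1, 2, 15, 11, 8, 3, 10, 6, 12, 5, 9, 0, 7],
--          [0, 15, 7, 4, 14, 2, 13, 1, 10, 6, 12, 11, 9, 5, 3, 8],
--          [4, 1, 14, 8, 13, 6, 2, 11, 15, 12, 9, 7, 3, 10, 5, 0],
--          [15, 12, 8, 2, 4, 9, 1, 7, 5, 11, 3, 14, 10, 0, 6, 13]]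
--     ones = 15
--     zeros = 15
--     for row in s:
--         c = row.index(num)
--         ones &= c
--         zeros &= ~c & 15
--     mid = ['1' if ones >> (3 - p) & 1 else ('0' if zeros >> (3 - p) & 1 else 'x')
--            for p in range(4)]
--     return ['x'] + mid + ['x']
-- ===== Notes on version B (the rewrite author's own statement) =====
-- stated objective: alternative
-- what changed: B replaces A's per-row 6-char option-string construction and per-position four-way character comparison by a single bitwise aggregation (AND of the four column indices and of their 4-bit complements) over the column index found in each row, with the constant 'x' borders written directly.
import Mathlib
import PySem

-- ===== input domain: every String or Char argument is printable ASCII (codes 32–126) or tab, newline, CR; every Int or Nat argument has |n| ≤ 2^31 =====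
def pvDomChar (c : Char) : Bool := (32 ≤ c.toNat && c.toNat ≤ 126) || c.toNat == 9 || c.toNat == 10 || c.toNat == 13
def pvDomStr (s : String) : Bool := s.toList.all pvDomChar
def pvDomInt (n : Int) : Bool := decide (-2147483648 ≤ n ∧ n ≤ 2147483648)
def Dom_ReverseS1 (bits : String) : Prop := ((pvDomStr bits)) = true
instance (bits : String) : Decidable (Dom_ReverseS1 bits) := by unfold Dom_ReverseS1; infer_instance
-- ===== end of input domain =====

-- B replaces A's per-row option-string building and char comparison by bitwise
-- aggregation over the four column indices; equivalence proved on all inputs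
-- where A returns (Pre_), by exhausting the 16 possible table values.

-- ===== PORT A =====
-- the DES S1 table (shared literal of both Pythons)
def pvS1 : List (List Int) :=
  [[14, 4, 13, 1, 2, 15, 11, 8, 3, 10, 6, 12, 5, 9, 0, 7],
   [0, 15, 7, 4, 14, 2, 13, 1, 10, 6, 12, 11, 9, 5, 3, 8],
   [4, 1, 14, 8, 13, 6, 2, 11, 15, 12, 9, 7, 3, 10, 5, 0],
   [15, 12, 8, 2, 4, 9, 1, 7, 5, 11, 3, 14, 10, 0, 6, 13]]

-- hand port of bin(n)[2:] for n ≥ 0 (exact: Python's bin of a nonnegative int);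
-- structural recursion on a fuel ≥ n so the kernel can reduce it
def pvBinAux : Nat → Nat → List Char
  | _, 0 => []
  | 0, _ => []
  | fuel + 1, n + 1 => pvBinAux fuel ((n + 1) / 2) ++ [if (n + 1) % 2 = 1 then '1' else '0']

def pvBin (n : Nat) : List Char := if n = 0 then ['0'] else pvBinAux n n

-- hand port of str.zfill(w) for digit strings (exact: no sign handling needed here)
def pvZfill (cs : List Char) (w : Nat) : List Char := List.replicate (w - cs.length) '0' ++ cs

-- the part of A after num = int(bits, 2): build options, then the agreement loop.
-- Python strings held as List Char; options has length 0 or 4 (each row of pvS1 is a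
-- permutation of 0..15); with fewer than 4 options Python raises IndexError at
-- options[0]/options[1] — those inputs are outside Pre_, the port returns [].
def pvACore (num : Int) (key : List String) : List String :=
  let options : List (List Char) :=
    (pvS1.foldl (fun (acc : List (List Char) × Nat) row =>
      let inner := row.foldl (fun (b : List (List Char) × Nat) j =>
        if j = num then
          let r := pvZfill (pvBin acc.2) 2     -- row    = bin(k)[2:].zfill(2)
          let c := pvZfill (pvBin b.2) 4       -- colomn = bin(q)[2:].zfill(4)
          -- temp = [row[0] + colomn[0:4] + row[1]]  (r has exactly 2 chars for k < 4)
          (b.1 ++ [[r.getD 0 '0'] ++ c ++ [r.getD 1 '0']], b.2 + 1)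
        else (b.1, b.2 + 1)) (acc.1, 0)        -- q = 0 at each row start
      (inner.1, acc.2 + 1)) (([], 0) : List (List Char) × Nat)).1
  match options with
  | o0 :: o1 :: o2 :: o3 :: _ =>
    (PySem.List.pyRange 0 6 1).foldl (fun (key : List String) i =>
      match PySem.List.pyGet? o0 i, PySem.List.pyGet? o1 i,
            PySem.List.pyGet? o2 i, PySem.List.pyGet? o3 i with
      | some c0, some c1, some c2, some c3 =>
        if c0 = c1 ∧ c0 = c2 ∧ c0 = c3
        then key.set i.toNat (String.ofList [c0])  -- key[i] = options[0][i]; i ∈ 0..5, nonneg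
        else key
      | _, _, _, _ => key                      -- IndexError (unreachable: options are 6 chars)
    ) key
  | _ => []                                    -- IndexError at options[0]; outside Pre_

def ReverseS1 (bits : String) : List String :=
  -- key = []; while i < 6: key += 'x'
  let key : List String := (PySem.List.pyRange 0 6 1).foldl (fun k _ => k ++ ["x"]) []
  if PySem.Str.isIn "x" bits then key
  else
    match PySem.Int.ofStrBase? bits 2 with    -- num = int(bits, 2)
    | none => []                               -- ValueError; outside Pre_
    | some num => pvACore num key

-- ===== PORT B =====
-- the part of B after num = int(bits, 2): AND of the column indices and of their
-- 4-bit complements; row.index(num) = none (ValueError) is outside Pre_, getD 0 there.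
def pvBCore (num : Int) : List String :=
  let cols : List Int := pvS1.map (fun row => (((PySem.List.index? row num).getD 0 : Nat) : Int))
  let oz : Int × Int := cols.foldl
    (fun (p : Int × Int) c =>
      (PySem.Int.band p.1 c, PySem.Int.band p.2 (PySem.Int.band (Int.not c) 15)))
    (15, 15)
  let mid : List String := (PySem.List.pyRange 0 4 1).map (fun p =>
    -- p ∈ 0..3 so (3 - p).toNat is exact for Python's 3 - p
    if PySem.Int.band (oz.1 >>> (3 - p).toNat) 1 ≠ 0 then "1"
    else if PySem.Int.band (oz.2 >>> (3 - p).toNat) 1 ≠ 0 then "0" else "x")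
  ["x"] ++ mid ++ ["x"]

def ReverseS1_alt (bits : String) : List String :=
  if PySem.Str.isIn "x" bits then ["x", "x", "x", "x", "x", "x"]
  else
    match PySem.Int.ofStrBase? bits 2 with
    | none => []                               -- ValueError; outside Pre_
    | some num => pvBCore num

-- ===== PRECONDITION & SPEC =====
-- Pre_ excludes exactly the inputs where A raises: bits without 'x' that are not a
-- valid base-2 int literal (ValueError), or whose value is outside 0..15 (IndexError).
def Pre_ReverseS1 (bits : String) : Prop :=
  PySem.Str.isIn "x" bits = true ∨
    (PySem.Int.ofStrBase? bits 2).any (fun n => decide (0 ≤ n ∧ n ≤ 15)) = true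
instance (bits : String) : Decidable (Pre_ReverseS1 bits) := by unfold Pre_ReverseS1; infer_instance

def pvWitness_ReverseS1 : String := "0101"

def Spec_ReverseS1 (bits : String) (out : List String) : Prop := out = ReverseS1_alt bits
instance (bits : String) (out : List String) : Decidable (Spec_ReverseS1 bits out) := by unfold Spec_ReverseS1; infer_instance

-- ===== CLAIM (what is proved, stated in full; the proofs are below) =====
def Claim_equal_ReverseS1 : Prop := ∀ (bits : String), Dom_ReverseS1 bits → Pre_ReverseS1 bits → Spec_ReverseS1 bits (ReverseS1 bits)

-- ===== LEMMAS AND PROOFS =====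
lemma pvKeyInit :
    (PySem.List.pyRange 0 6 1).foldl (fun (k : List String) _ => k ++ ["x"]) [] =
      ["x", "x", "x", "x", "x", "x"] := by decide

lemma pvCore_eq (n : Int) (h0 : 0 ≤ n) (h15 : n ≤ 15) :
    pvACore n ["x", "x", "x", "x", "x", "x"] = pvBCore n := by
  have : n = 0 ∨ n = 1 ∨ n = 2 ∨ n = 3 ∨ n = 4 ∨ n = 5 ∨ n = 6 ∨ n = 7 ∨ n = 8 ∨
      n = 9 ∨ n = 10 ∨ n = 11 ∨ n = 12 ∨ n = 13 ∨ n = 14 ∨ n = 15 := by omega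
  rcases this with h | h | h | h | h | h | h | h | h | h | h | h | h | h | h | h <;>
    subst h <;> decide

-- ===== VERDICT (by name: the statement is the Claim_ definition above) =====
theorem ReverseS1_spec : Claim_equal_ReverseS1 := by
  intro bits _ hpre
  unfold Spec_ReverseS1
  by_cases hx : PySem.Str.isIn "x" bits = true
  · have hx' : PySem.Chars.isIn ['x'] bits.toList = true := by simpa using hx
    simp [ReverseS1, ReverseS1_alt, hx']
  · rcases hpre with h | h
    · exact absurd h hx
    · cases hp : PySem.Int.ofStrBase? bits 2 with
      | none => rw [hp] at h; simp at h
      | some n =>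
        rw [hp] at h
        simp only [Option.any_some, decide_eq_true_eq] at h
        simp only [ReverseS1, ReverseS1_alt, PySem.Str.isIn_eq, hp, pvKeyInit]
        rw [if_neg (by simpa using hx), if_neg (by simpa using hx)]
        exact pvCore_eq n h.1 h.2
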